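-- pv_equiv track=rewrite | github.com/tumbarell/NLP | lalab_functions.py | keys_to_apply_generator
-- ===== SOURCE A (Python) =====
-- def keys_to_apply_generator(ref_key, separators_keys):
--     if ref_key == 0 or ref_key == 123456:
--         return separators_keys
--     ref_key = str(ref_key)
--     keys2apply = []
--     for key in ref_key:
--         aux_list = [tup for tup in separators_keys if int(key) in tup]
--         keys2apply += aux_list
--     keys2apply = list(set(keys2apply))
--     keys2apply.sort()
--     return keys2apply
-- ===== SOURCE B (Python) =====
-- def keys_to_apply_generator(ref_key, separators_keys):
--     if ref_key == 0 or ref_key == 123456: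
--         return separators_keys
--     digits = {int(c) for c in str(ref_key)}
--     out = []
--     for tup in sorted(separators_keys):
--         if (not out or out[-1] != tup) and any(d in digits for d in tup):
--             out.append(tup)
--     return out
-- ===== Notes on version B (the rewrite author's own statement) =====
-- stated objective: alternative
-- what changed: Instead of scanning separators_keys once per digit character of ref_key, concatenating matches, deduplicating with set() and sorting, B sorts separators_keys once and does a single accumulator scan that keeps tuples intersecting the precomputed digit set while dropping adjacent duplicates.
-- outside the precondition, e.g. on keys_to_apply_generator(-3, []): A returns [], B raises ValueError; on keys_to_apply_generator(-5, [(5,)]): A raises ValueError, B raises ValueError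
import Mathlib
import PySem

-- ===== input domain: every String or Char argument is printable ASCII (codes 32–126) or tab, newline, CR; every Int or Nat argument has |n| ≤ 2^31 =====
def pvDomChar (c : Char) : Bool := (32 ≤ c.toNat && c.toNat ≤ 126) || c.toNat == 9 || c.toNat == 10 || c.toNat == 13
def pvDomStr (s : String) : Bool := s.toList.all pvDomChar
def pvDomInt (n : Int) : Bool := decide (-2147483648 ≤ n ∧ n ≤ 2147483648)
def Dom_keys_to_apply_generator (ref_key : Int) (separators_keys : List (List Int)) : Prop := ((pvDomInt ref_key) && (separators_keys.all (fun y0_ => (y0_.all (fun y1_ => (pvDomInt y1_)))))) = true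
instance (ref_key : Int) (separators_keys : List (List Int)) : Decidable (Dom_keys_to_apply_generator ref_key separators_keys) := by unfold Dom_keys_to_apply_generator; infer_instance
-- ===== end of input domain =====

-- B sorts separators_keys once and makes a single scan that filters by a precomputed digit set and deduplicates
-- adjacent equals, instead of A's one scan per digit character followed by set() and sort; return-value equivalence
-- on nonnegative ref_key.

-- ===== PORT A =====
-- int(key) for a single char: under Pre_ (0 ≤ ref_key) every char of str(ref_key) is a digit, so ofChars? is some; .getD 0 is never taken.
def keys_to_apply_generator (ref_key : Int) (separators_keys : List (List Int)) : List (List Int) :=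
  if ref_key = 0 ∨ ref_key = 123456 then separators_keys
  else
    let rs := PySem.Int.toChars ref_key
    let keys2apply := rs.foldl
      (fun acc key => acc ++ separators_keys.filter
        (fun tup => tup.contains ((PySem.Int.ofChars? [key]).getD 0))) []
    PySem.List.sorted (PySem.Set.ofList keys2apply) (fun x => x) false

-- ===== PORT B =====
def keys_to_apply_generator_alt (ref_key : Int) (separators_keys : List (List Int)) : List (List Int) :=
  if ref_key = 0 ∨ ref_key = 123456 then separators_keys
  else
    let digits : PySem.Set Int :=
      PySem.Set.ofList ((PySem.Int.toChars ref_key).map (fun c => (PySem.Int.ofChars? [c]).getD 0))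
    (PySem.List.sorted separators_keys (fun x => x) false).foldl
      (fun out tup =>
        if (decide (out = []) || out.getLast? != some tup)
            && tup.any (fun d => digits.contains d)
        then out ++ [tup] else out) []

-- ===== PRECONDITION & SPEC =====
-- Pre_ excludes negative ref_key: str(ref_key) starts with '-', so A raises ValueError on int('-') for any nonempty
-- separators_keys, and B raises ValueError there too (it always evaluates int('-')); on empty separators_keys A happens
-- to return [] only because its comprehension never evaluates int('-'), while B still raises.
def Pre_keys_to_apply_generator (ref_key : Int) (separators_keys : List (List Int)) : Prop := 0 ≤ ref_key
instance (ref_key : Int) (separators_keys : List (List Int)) : Decidable (Pre_keys_to_apply_generator ref_key separators_keys) := by unfold Pre_keys_to_apply_generator; infer_instance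
def pvWitness_keys_to_apply_generator : Int × List (List Int) := (57, [[5, 1], [2, 3], [5, 1]])
def Spec_keys_to_apply_generator (ref_key : Int) (separators_keys : List (List Int)) (out : List (List Int)) : Prop := out = keys_to_apply_generator_alt ref_key separators_keys
instance (ref_key : Int) (separators_keys : List (List Int)) (out : List (List Int)) : Decidable (Spec_keys_to_apply_generator ref_key separators_keys out) := by unfold Spec_keys_to_apply_generator; infer_instance

-- ===== CLAIM (what is proved, stated in full; the proofs are below) =====
def Claim_equal_keys_to_apply_generator : Prop := ∀ (ref_key : Int) (separators_keys : List (List Int)), Dom_keys_to_apply_generator ref_key separators_keys → Pre_keys_to_apply_generator ref_key separators_keys → Spec_keys_to_apply_generator ref_key separators_keys (keys_to_apply_generator ref_key separators_keys)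

-- ===== LEMMAS AND PROOFS =====

-- A's pool (one filter pass per digit char, concatenated) has exactly the tuples meeting some digit.
lemma poolA_mem (ref_key : Int) (separators_keys : List (List Int)) (t : List Int) :
    (t ∈ (PySem.Int.toChars ref_key).foldl
      (fun acc key => acc ++ separators_keys.filter
        (fun tup => tup.contains ((PySem.Int.ofChars? [key]).getD 0))) []) ↔
    (t ∈ separators_keys ∧
      ∃ c ∈ PySem.Int.toChars ref_key, ((PySem.Int.ofChars? [c]).getD 0) ∈ t) := by
  rw [PySem.List.foldl_append_eq_flatMap]
  simp only [List.nil_append, List.mem_flatMap, List.mem_filter, List.contains_iff_mem,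
]
  tauto

-- B's scan invariant: over a sorted remainder, starting from a sorted accumulator whose elements all
-- precede the remainder and all match, the fold returns a strictly increasing list whose members are
-- the accumulator's plus the matching elements of the remainder.
lemma scan_invariant (p : List Int → Bool) (l out : List (List Int))
    (hl : l.Pairwise (· ≤ ·)) (hout : out.Pairwise (· < ·))
    (hle : ∀ a ∈ out, ∀ b ∈ l, a ≤ b) :
    let r := l.foldl (fun out tup =>
      if (decide (out = []) || out.getLast? != some tup) && p tup
      then out ++ [tup] else out) out
    r.Pairwise (· < ·) ∧ (∀ x, x ∈ r ↔ x ∈ out ∨ (x ∈ l ∧ p x = true)) := by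
  induction l generalizing out with
  | nil => exact ⟨hout, by simp⟩
  | cons t l ih =>
    simp only [List.foldl_cons]
    have hlt : l.Pairwise (· ≤ ·) := hl.tail
    have htl : ∀ b ∈ l, t ≤ b := fun b hb => (List.pairwise_cons.mp hl).1 b hb
    by_cases hc : ((decide (out = []) || out.getLast? != some t) && p t) = true
    · -- t is appended
      have hpt : p t = true := (Bool.and_eq_true_iff.mp hc).2
      have hne : ∀ a ∈ out, a < t := by
        intro a ha
        rcases lt_or_eq_of_le (hle a ha t List.mem_cons_self) with h | h
        · exact h
        · exfalso
          subst h
          have hnnil : out ≠ [] := List.ne_nil_of_mem ha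
          rcases Bool.or_eq_true_iff.mp (Bool.and_eq_true_iff.mp hc).1 with h1 | h1
          · exact hnnil (decide_eq_true_eq.mp h1)
          · -- out.getLast? ≠ some a, yet a ∈ out is maximal in the <-sorted out
            obtain ⟨i, hi, hieq⟩ := List.getElem_of_mem ha
            have hlast : out.getLast hnnil = out[out.length - 1]'(by omega) :=
              List.getLast_eq_getElem hnnil
            have hglast : out.getLast? = some (out.getLast hnnil) :=
              List.getLast?_eq_some_getLast hnnil
            have hgle : out.getLast hnnil ≤ a :=
              hle _ (List.getLast_mem hnnil) a List.mem_cons_self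
            have hige : a ≤ out.getLast hnnil := by
              rcases Nat.lt_or_ge i (out.length - 1) with h2 | h2
              · have := List.pairwise_iff_getElem.mp hout i (out.length - 1)
                  hi (by omega) h2
                rw [hieq] at this
                rw [hlast]; exact le_of_lt this
              · have : i = out.length - 1 := by omega
                rw [hlast, ← hieq]; simp [this]
            have : out.getLast? = some a := by
              rw [hglast]; exact congrArg some (le_antisymm hgle hige)
            simp [this] at h1
      rw [if_pos hc]
      have hout' : (out ++ [t]).Pairwise (· < ·) := by
        rw [List.pairwise_append]
        exact ⟨hout, List.pairwise_singleton _ _, by simpa using hne⟩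
      have hle' : ∀ a ∈ out ++ [t], ∀ b ∈ l, a ≤ b := by
        intro a ha b hb
        rcases List.mem_append.mp ha with h | h
        · exact hle a h b (List.mem_cons_of_mem _ hb)
        · simp only [List.mem_singleton] at h; subst h; exact htl b hb
      obtain ⟨h1, h2⟩ := ih (out ++ [t]) hlt hout' hle'
      refine ⟨h1, fun x => ?_⟩
      rw [h2 x]
      have hxt : x = t → p x = true := fun h => h ▸ hpt
      simp only [List.mem_append, List.mem_cons]
      tauto
    · -- t is skipped: either p t = false, or out.getLast? = some t (t already in out)
      rw [if_neg (by simpa using hc)]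
      have hle' : ∀ a ∈ out, ∀ b ∈ l, a ≤ b := fun a ha b hb =>
        hle a ha b (List.mem_cons_of_mem _ hb)
      obtain ⟨h1, h2⟩ := ih out hlt hout hle'
      refine ⟨h1, fun x => ?_⟩
      rw [h2 x]
      have htout : p t = true → t ∈ out := by
        intro hpt
        have hor : ¬ ((decide (out = []) || out.getLast? != some t) = true) :=
          fun hx => hc (Bool.and_eq_true_iff.mpr ⟨hx, hpt⟩)
        rw [Bool.or_eq_true_iff, not_or] at hor
        have : out.getLast? = some t := by
          have := hor.2
          simpa using this
        exact List.mem_of_getLast? this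
      have hxt : x = t → p x = true → x ∈ out := fun h hp => h ▸ htout (h ▸ hp)
      simp only [List.mem_cons]
      tauto

-- The port elaborates PySem.List.sorted with core's LT instance on List Int; the PySem order lemmas use the
-- (definitionally equal) LinearOrder instance. This bridges the two (Decidable instances are subsingletons).
lemma sorted_inst (xs : List (List Int)) :
    @PySem.List.sorted (List Int) (List Int) List.instLT (fun a b => a.decidableLT b) xs (fun x => x) false
    = @PySem.List.sorted (List Int) (List Int) List.instLinearOrder.toLT LinearOrder.toDecidableLT xs (fun x => x) false := by
  congr 1

-- ===== VERDICT (by name: the statement is the Claim_ definition above) =====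
theorem keys_to_apply_generator_spec : Claim_equal_keys_to_apply_generator := by
  intro ref_key separators_keys _ _
  unfold Spec_keys_to_apply_generator keys_to_apply_generator keys_to_apply_generator_alt
  by_cases h : ref_key = 0 ∨ ref_key = 123456
  · simp [h]
  · simp only [h, if_false]
    set p : List Int → Bool := fun tup => tup.any (fun d =>
      (PySem.Set.ofList ((PySem.Int.toChars ref_key).map
        (fun c => (PySem.Int.ofChars? [c]).getD 0))).contains d) with hp
    have hsorted : (PySem.List.sorted separators_keys (fun x => x) false).Pairwise (· ≤ ·) := by
      rw [sorted_inst]; exact PySem.List.sorted_pairwise separators_keys (fun x => x)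
    have hms : ∀ x : List Int, x ∈ PySem.List.sorted separators_keys (fun x => x) false ↔
        x ∈ separators_keys := by
      intro x; exact PySem.List.mem_sorted separators_keys (fun x => x) false x
    obtain ⟨hpw, hmem⟩ := scan_invariant p
      (PySem.List.sorted separators_keys (fun x => x) false) [] hsorted (by simp) (by simp)
    conv_lhs => rw [sorted_inst]
    apply PySem.List.sorted_eq_of_perm_of_pairwise_lt
    · -- permutation: both sides are nodup with the same members
      rw [List.perm_ext_iff_of_nodup (hpw.imp ne_of_lt) (PySem.Set.nodup_ofList _)]
      intro t
      rw [hmem t, PySem.Set.mem_ofList, poolA_mem]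
      simp only [List.not_mem_nil, false_or, hms, hp, List.any_eq_true, PySem.Set.contains_iff]
      constructor
      · rintro ⟨ht, d, hd, hdin⟩
        refine ⟨ht, ?_⟩
        rw [PySem.Set.mem_ofList, List.mem_map] at hdin
        obtain ⟨c, hc, rfl⟩ := hdin
        exact ⟨c, hc, hd⟩
      · rintro ⟨ht, c, hc, hcd⟩
        exact ⟨ht, _, hcd, by rw [PySem.Set.mem_ofList, List.mem_map]; exact ⟨c, hc, rfl⟩⟩
    · exact hpw
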